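-- pv_equiv track=rewrite | github.com/posl/comment_recommendation | script/split_gen/2_time/zh/185_D/4.py | solve
-- ===== SOURCE A (Python) =====
-- def solve(n, m, a):
--     a.sort()
--     if m == 0:
--         return 1
--     if m == n:
--         return 0
--     if m == 1:
--         return n - 1
--     d = []
--     for i in range(m - 1):
--         d.append(a[i + 1] - a[i] - 1)
--     d.sort()
--     return n - 1 - sum(d[-(m - 1):])
-- ===== SOURCE B (Python) =====
-- def solve(n, m, a):
--     a.sort()
--     if m == 0:
--         return 1
--     if m == n:
--         return 0
--     if m >= 2:
--         # gaps between consecutive of the m smallest telescope: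
--         # sum(a[i+1]-a[i]-1 for i<m-1) = a[m-1] - a[0] - (m-1)
--         return n + m - 2 - (a[m - 1] - a[0])
--     return n - 1
-- ===== Notes on version B (the rewrite author's own statement) =====
-- stated objective: simpler
-- what changed: B replaces A's gap-list construction, second sort and slice-sum with the telescoped closed form n+m-2-(a[m-1]-a[0]) on the sorted list.
import Mathlib
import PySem

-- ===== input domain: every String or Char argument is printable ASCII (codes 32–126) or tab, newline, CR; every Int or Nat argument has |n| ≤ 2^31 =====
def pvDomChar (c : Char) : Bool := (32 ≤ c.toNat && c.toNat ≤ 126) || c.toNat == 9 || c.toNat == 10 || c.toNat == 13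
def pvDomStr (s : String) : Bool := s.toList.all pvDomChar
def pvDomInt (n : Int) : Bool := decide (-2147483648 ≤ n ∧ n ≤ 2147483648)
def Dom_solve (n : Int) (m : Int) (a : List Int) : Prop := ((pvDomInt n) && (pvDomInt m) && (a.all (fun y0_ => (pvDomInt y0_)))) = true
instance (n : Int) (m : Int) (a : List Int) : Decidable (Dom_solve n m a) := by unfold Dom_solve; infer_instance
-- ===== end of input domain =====

-- B replaces A's gap-list + second sort + slice-sum with the telescoped closed form
-- n+m-2-(a[m-1]-a[0]); objective: simpler. Both A and B sort the argument list in place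
-- (same mutation); the equivalence proved here is about the return value.

-- ===== PORT A =====
def solve (n : Int) (m : Int) (a : List Int) : Int :=
  let s := PySem.List.sorted a (fun x => x) false
  if m = 0 then 1
  else if m = n then 0
  else if m = 1 then n - 1
  else
    let d := (PySem.List.pyRange 0 (m - 1) 1).foldl
      (fun acc i => acc ++ [PySem.List.pyGetD s (i + 1) 0 - PySem.List.pyGetD s i 0 - 1]) []
    let ds := PySem.List.sorted d (fun x => x) false
    n - 1 - (PySem.List.slice ds (some (-(m - 1))) none).sum

-- ===== PORT B =====
def solve_alt (n : Int) (m : Int) (a : List Int) : Int :=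
  let s := PySem.List.sorted a (fun x => x) false
  if m = 0 then 1
  else if m = n then 0
  else if 2 ≤ m then
    n + m - 2 - (PySem.List.pyGetD s (m - 1) 0 - PySem.List.pyGetD s 0 0)
  else n - 1

-- ===== PRECONDITION & SPEC =====
-- Pre_ excludes exactly the inputs where A raises IndexError: 2 ≤ m with m ≠ n and m > len(a).
def Pre_solve (n : Int) (m : Int) (a : List Int) : Prop :=
  m ≤ 1 ∨ m = n ∨ m ≤ (a.length : Int)
instance (n : Int) (m : Int) (a : List Int) : Decidable (Pre_solve n m a) := by
  unfold Pre_solve; infer_instance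
def pvWitness_solve : Int × Int × List Int := (7, 3, [4, 9, 1, 2, 6])

def Spec_solve (n : Int) (m : Int) (a : List Int) (out : Int) : Prop := out = solve_alt n m a
instance (n : Int) (m : Int) (a : List Int) (out : Int) : Decidable (Spec_solve n m a out) := by
  unfold Spec_solve; infer_instance

-- ===== CLAIM (what is proved, stated in full; the proofs are below) =====
def Claim_equal_solve : Prop := ∀ (n : Int) (m : Int) (a : List Int), Dom_solve n m a → Pre_solve n m a → Spec_solve n m a (solve n m a)

-- ===== LEMMAS AND PROOFS =====

-- telescoping sum of consecutive gaps
theorem pv_telescope (f : Int → Int) (K : Nat) :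
    ((List.range K).map (fun k : Nat => f ((k : Int) + 1) - f (k : Int) - 1)).sum
      = f (K : Int) - f 0 - (K : Int) := by
  induction K with
  | zero => simp
  | succ K ih =>
    rw [List.range_succ, List.map_append, List.sum_append, ih]
    push_cast
    simp
    ring

-- ===== VERDICT (by name: the statement is the Claim_ definition above) =====
theorem solve_spec : Claim_equal_solve := by
  intro n m a _hdom hpre
  unfold Spec_solve solve solve_alt
  by_cases h0 : m = 0
  · simp [h0]
  · by_cases hn : m = n
    · simp [hn]
    · by_cases h1 : m = 1
      · simp [h1]
      · by_cases h2 : 2 ≤ m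
        · -- main case: 2 ≤ m, m ≠ n, and by Pre_ m ≤ len a
          have hlen : m ≤ (a.length : Int) := by
            rcases hpre with h | h | h
            · omega
            · exact absurd h hn
            · exact h
          simp only [h0, hn, h1, h2, if_false, if_pos]
          rw [PySem.List.foldl_append_singleton_eq_map, List.nil_append]
          set s := PySem.List.sorted a (fun x => x) false with hs
          have hslen : (s.length : Int) = (a.length : Int) := by
            simp [hs, PySem.List.length_sorted]
          set g : Int → Int := fun i => PySem.List.pyGetD s i 0 with hg
          set d := (PySem.List.pyRange 0 (m - 1) 1).map (fun i => g (i + 1) - g i - 1) with hd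
          have hdlen : d.length = (m - 1).toNat := by
            simp [hd, PySem.List.length_pyRange_one]
          have hperm : (PySem.List.sorted d (fun x => x) false).Perm d :=
            PySem.List.sorted_perm d (fun x => x) false
          have hdslen : (PySem.List.sorted d (fun x => x) false).length = (m - 1).toNat := by
            rw [hperm.length_eq, hdlen]
          -- the slice d[-(m-1):] is all of the sorted d
          have hk : -(m - 1) = -(((m - 1).toNat : Nat) : Int) := by omega
          rw [hk, PySem.List.slice_from_neg_natCast _ _ (by omega), hdslen, Nat.sub_self,
            List.drop_zero, hperm.sum_eq]
          -- telescoping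
          have hsum : d.sum = g (m - 1) - g 0 - (m - 1) := by
            have hcast : (((m - 1).toNat : Nat) : Int) = m - 1 := by omega
            rw [hd, PySem.List.pyRange_one, List.map_map, Int.sub_zero]
            have heq : ((fun i => g (i + 1) - g i - 1) ∘ fun k : Nat => (0 : Int) + (k : Int))
                = fun k : Nat => g ((k : Int) + 1) - g (k : Int) - 1 := by
              funext k; simp
            rw [heq, pv_telescope g (m - 1).toNat, hcast]
          rw [hsum]
          ring
        · -- m < 0 (m ≠ 0, 1): d is empty, both sides n - 1
          simp only [h0, hn, h1, if_false]
          have hneg : m - 1 ≤ 0 := by omega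
          rw [if_neg h2, PySem.List.pyRange_one_eq_nil (by omega)]
          simp [PySem.List.sorted, PySem.List.slice]
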